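-- pv_equiv track=rewrite | github.com/mzdravkov/mosquitoes | analysis.py | get_anthropophily_groups
-- ===== SOURCE A (Python) =====
-- SPECIES_ANTHROPOPHILY = {
-- 'GCA_000441895.2': -1.0, # Anopheles sinensis [Ree, Han-Il, et al. 2001][PMC2712014]
-- 'GCF_000005575.2': 1.0, # Anopheles gambiae str. PEST [takken (PMC4381365)]
-- 'GCF_002204515.2': 1.0, # Aedes aegypti [McMeniman 2011]
-- 'GCF_006496715.1': 1.0, # Aedes albopictus [Alongkot Ponlawat 2005]
-- 'GCF_006496715.2': 1.0, # Asian tiger mosquito (Aedes albupictus) [Alongkot Ponlawat 2005]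
-- 'GCF_013141755.1': -1.0, # Anopheles stephensi [Thomas, S., Ravishankaran 2017]
-- 'GCF_013758885.1': -1.0, # Anopheles albimanus [Bruce-Chwatt 1966 (PMC2476083)]
-- 'GCF_015732765.1': -1.0, # Culex quinquefasciatus [takken (PMC4381365)]
-- 'GCF_016801865.1': -1.0, # Culex pipiens pallens [Joaquín Muñoz 2011]
-- 'GCF_016801865.2': -1.0, # Culex pipiens pallens [Joaquín Muñoz 2011]
-- 'GCF_016920715.1': -1.0, # Anopheles arabiensis [tekken (PMC4381365)]
-- 'GCF_017562075.2': -1.0, # Anopheles merus [Pamela C Kipyab 2013]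
-- 'GCF_029784135.1': -1.0, # Toxorhynchites rutilus septentrionalis [the whole genus doesn't consume blood]
-- 'GCF_029784155.1': -1.0, # Uranotaenia lowii [Reeves & Holderman 2018]
-- 'GCF_029784165.1': -1.0, # pitcher-plant mosquito (Wyeomyia smithii)
-- # 'GCF_030247185.1': , # Malaya genurostris
-- # 'GCF_030247195.1': , # Topomyia yanbarensis
-- 'GCF_943734635.1': 1.0, # Anopheles cruzii [Kirchgatter 2014, Santos 2019]
-- 'GCF_943734655.1': 1.0, # Sabethes cyaneus [Leticia Smith 2023]
-- 'GCF_943734665.1': 1.0, # Anopheles aquasalis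
-- 'GCF_943734685.1': 1.0, # Anopheles coluzzii [Martin C. Akogbéto 2018]
-- 'GCF_943734695.1': 1.0, # Anopheles maculipalpis
-- # 'GCF_943734705.1': , # Anopheles coustani
-- 'GCF_943734725.1': 1.0, # Anopheles marshallii [Boris Makanga 2016]
-- 'GCF_943734745.1': 1.0, # Anopheles darlingi [Marta Moreno 2017]
-- 'GCF_943734755.1': 1.0, # Anopheles moucheti [Sinka 2010]
-- # 'GCF_943734765.1': , # Anopheles ziemanni
-- 'GCF_943734845.2': 1.0, # Anopheles funestus [tekken (PMC4381365)]
-- # 'GCF_943735745.2': , # Anopheles bellator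
-- 'GCF_943737925.1': 1.0, # Anopheles nili [Antonio-Nkondjio 2013 (Anopheles mosquitoes book)]
-- }
--
-- def get_anthropophily_groups(test_species=None):
--     return {
--             'LOW': {s for s in SPECIES_ANTHROPOPHILY
--                     if s != test_species
--                     and SPECIES_ANTHROPOPHILY[s] <= -0.333},
--             'AMBIVALENT': {s for s in SPECIES_ANTHROPOPHILY
--                            if s != test_species
--                            and SPECIES_ANTHROPOPHILY[s] > -0.333
--                            and SPECIES_ANTHROPOPHILY[s] <= 0.333},
--             'HIGH': {s for s in SPECIES_ANTHROPOPHILY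
--                      if s != test_species
--                      and SPECIES_ANTHROPOPHILY[s] > 0.333},
--     }
-- ===== SOURCE B (Python) =====
-- # B: one partitioning pass over SPECIES_ANTHROPOPHILY.items() with an if/elif/else
-- # dispatch, instead of A's three independent re-scans of the dict (each re-indexing it).
--
-- SPECIES_ANTHROPOPHILY = {
-- 'GCA_000441895.2': -1.0,
-- 'GCF_000005575.2': 1.0,
-- 'GCF_002204515.2': 1.0,
-- 'GCF_006496715.1': 1.0,
-- 'GCF_006496715.2': 1.0,
-- 'GCF_013141755.1': -1.0,
-- 'GCF_013758885.1': -1.0,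
-- 'GCF_015732765.1': -1.0,
-- 'GCF_016801865.1': -1.0,
-- 'GCF_016801865.2': -1.0,
-- 'GCF_016920715.1': -1.0,
-- 'GCF_017562075.2': -1.0,
-- 'GCF_029784135.1': -1.0,
-- 'GCF_029784155.1': -1.0,
-- 'GCF_029784165.1': -1.0,
-- 'GCF_943734635.1': 1.0,
-- 'GCF_943734655.1': 1.0,
-- 'GCF_943734665.1': 1.0,
-- 'GCF_943734685.1': 1.0,
-- 'GCF_943734695.1': 1.0,
-- 'GCF_943734725.1': 1.0,
-- 'GCF_943734745.1': 1.0,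
-- 'GCF_943734755.1': 1.0,
-- 'GCF_943734845.2': 1.0,
-- 'GCF_943737925.1': 1.0,
-- }
--
-- def get_anthropophily_groups(test_species=None):
--     low, ambivalent, high = set(), set(), set()
--     for s, v in SPECIES_ANTHROPOPHILY.items():
--         if s == test_species:
--             continue
--         if v <= -0.333:
--             low.add(s)
--         elif v <= 0.333:
--             ambivalent.add(s)
--         else:
--             high.add(s)
--     return {'LOW': low, 'AMBIVALENT': ambivalent, 'HIGH': high}
-- ===== Notes on version B (the rewrite author's own statement) =====
-- stated objective: simpler
-- what changed: One partitioning pass over SPECIES_ANTHROPOPHILY.items() with an if/elif/else dispatch into three sets, replacing A's three independent comprehension scans that each re-index the dict.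
import Mathlib
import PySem

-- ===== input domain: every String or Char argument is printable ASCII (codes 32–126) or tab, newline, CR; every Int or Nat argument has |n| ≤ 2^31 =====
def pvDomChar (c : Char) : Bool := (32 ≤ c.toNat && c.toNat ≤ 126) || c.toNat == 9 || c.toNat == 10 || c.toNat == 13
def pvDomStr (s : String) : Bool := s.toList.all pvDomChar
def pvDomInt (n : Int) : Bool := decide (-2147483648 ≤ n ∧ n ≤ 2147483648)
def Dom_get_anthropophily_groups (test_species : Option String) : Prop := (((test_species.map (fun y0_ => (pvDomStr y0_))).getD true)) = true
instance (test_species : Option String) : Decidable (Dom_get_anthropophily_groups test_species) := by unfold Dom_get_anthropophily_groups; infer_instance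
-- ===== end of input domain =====

-- B replaces A's three comprehension scans of the dict by ONE partitioning pass with if/elif/else (objective: simpler).
-- The module constant SPECIES_ANTHROPOPHILY holds only the float values -1.0 / 1.0 and the thresholds are ±0.333,
-- so values are represented exactly in integer thousandths (-1000 / 1000, thresholds -333 / 333): every Python float
-- comparison the two programs perform is reproduced exactly.
def pvSP : List (String × Int) := [
  ("GCA_000441895.2", -1000), ("GCF_000005575.2", 1000), ("GCF_002204515.2", 1000),
  ("GCF_006496715.1", 1000), ("GCF_006496715.2", 1000), ("GCF_013141755.1", -1000),
  ("GCF_013758885.1", -1000), ("GCF_015732765.1", -1000), ("GCF_016801865.1", -1000),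
  ("GCF_016801865.2", -1000), ("GCF_016920715.1", -1000), ("GCF_017562075.2", -1000),
  ("GCF_029784135.1", -1000), ("GCF_029784155.1", -1000), ("GCF_029784165.1", -1000),
  ("GCF_943734635.1", 1000), ("GCF_943734655.1", 1000), ("GCF_943734665.1", 1000),
  ("GCF_943734685.1", 1000), ("GCF_943734695.1", 1000), ("GCF_943734725.1", 1000),
  ("GCF_943734745.1", 1000), ("GCF_943734755.1", 1000), ("GCF_943734845.2", 1000),
  ("GCF_943737925.1", 1000)]

-- ===== PORT A =====
-- SPECIES_ANTHROPOPHILY[s]; s is always drawn from the dict's own keys, so get? is always some (getD 0 never fires).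
def pvLookup (s : String) : Int := (PySem.Dict.get? (PySem.Dict.ofList pvSP) s).getD 0

-- each set comprehension: iterate the dict's keys, test the conditions in order, collect as a Python set
def get_anthropophily_groups (test_species : Option String) : List (String × List String) :=
  [("LOW", PySem.Set.ofList ((pvSP.map Prod.fst).filter
      (fun s => decide (some s ≠ test_species) && decide (pvLookup s ≤ -333)))),
   ("AMBIVALENT", PySem.Set.ofList ((pvSP.map Prod.fst).filter
      (fun s => decide (some s ≠ test_species) && decide (pvLookup s > -333) && decide (pvLookup s ≤ 333)))),
   ("HIGH", PySem.Set.ofList ((pvSP.map Prod.fst).filter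
      (fun s => decide (some s ≠ test_species) && decide (pvLookup s > 333))))]

-- ===== PORT B =====
-- the loop body: skip the test species, else dispatch into exactly one of the three sets
def pvStep (test_species : Option String)
    (acc : List String × List String × List String) (p : String × Int) :
    List String × List String × List String :=
  if some p.1 == test_species then acc
  else if p.2 ≤ -333 then (PySem.Set.add acc.1 p.1, acc.2.1, acc.2.2)
  else if p.2 ≤ 333 then (acc.1, PySem.Set.add acc.2.1 p.1, acc.2.2)
  else (acc.1, acc.2.1, PySem.Set.add acc.2.2 p.1)

def get_anthropophily_groups_alt (test_species : Option String) : List (String × List String) :=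
  let acc := pvSP.foldl (pvStep test_species) ([], [], [])
  [("LOW", acc.1), ("AMBIVALENT", acc.2.1), ("HIGH", acc.2.2)]

-- ===== PRECONDITION & SPEC =====
def Spec_get_anthropophily_groups (test_species : Option String) (out : List (String × List String)) : Prop := out = get_anthropophily_groups_alt test_species
instance (test_species : Option String) (out : List (String × List String)) : Decidable (Spec_get_anthropophily_groups test_species out) := by unfold Spec_get_anthropophily_groups; infer_instance

-- ===== CLAIM (what is proved, stated in full; the proofs are below) =====
def Claim_equal_get_anthropophily_groups : Prop := ∀ (test_species : Option String), Dom_get_anthropophily_groups test_species → Spec_get_anthropophily_groups test_species (get_anthropophily_groups test_species)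

-- ===== LEMMAS AND PROOFS =====

-- the dict's keys are pairwise distinct
lemma pvSP_keys_nodup : (pvSP.map Prod.fst).Nodup := by decide

-- looking a key of the dict up returns its stored value
lemma pvLookup_mem : ∀ p ∈ pvSP, pvLookup p.1 = p.2 := by decide

-- A's "iterate keys, re-index the dict" pattern equals filtering the pairs directly
lemma pvMapFilter (f : String → Int → Bool) :
    ∀ l : List (String × Int), (∀ p ∈ l, pvLookup p.1 = p.2) →
      (l.map Prod.fst).filter (fun s => f s (pvLookup s))
        = (l.filter (fun p => f p.1 p.2)).map Prod.fst := by
  intro l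
  induction l with
  | nil => intro _; rfl
  | cons p rest ih =>
    intro h
    have hp : pvLookup p.1 = p.2 := h p (by simp)
    simp only [List.map_cons, List.filter_cons, hp]
    by_cases hc : f p.1 p.2 = true
    · simp [hc, ih (fun q hq => h q (by simp [hq]))]
    · simp [hc, ih (fun q hq => h q (by simp [hq]))]

-- adding a fresh element to a Python set appends it
lemma pvSetAddFresh (s : List String) (x : String) (hx : x ∉ s) :
    PySem.Set.add s x = s ++ [x] := by
  simp [PySem.Set.add, PySem.Set.contains, List.contains_eq_mem, hx]

-- B's single pass computes the three filters, for any prefix state disjoint from the remaining keys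
lemma pvFoldlPartition (t : Option String) :
    ∀ (l : List (String × Int)) (a b c : List String),
      (l.map Prod.fst).Nodup →
      (∀ x ∈ l.map Prod.fst, x ∉ a ∧ x ∉ b ∧ x ∉ c) →
      l.foldl (pvStep t) (a, b, c)
        = (a ++ (l.filter (fun p => decide (some p.1 ≠ t) && decide (p.2 ≤ -333))).map Prod.fst,
           b ++ (l.filter (fun p => decide (some p.1 ≠ t) && !decide (p.2 ≤ -333) && decide (p.2 ≤ 333))).map Prod.fst,
           c ++ (l.filter (fun p => decide (some p.1 ≠ t) && !decide (p.2 ≤ 333))).map Prod.fst) := by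
  intro l
  induction l with
  | nil => intro a b c _ _; simp
  | cons p rest ih =>
    intro a b c hnd hdisj
    have hndr : (rest.map Prod.fst).Nodup := by
      simp only [List.map_cons, List.nodup_cons] at hnd; exact hnd.2
    have hfresh : p.1 ∉ rest.map Prod.fst := by
      simp only [List.map_cons, List.nodup_cons] at hnd; exact hnd.1
    have hpa := hdisj p.1 (by simp)
    simp only [List.foldl_cons, List.filter_cons, pvStep]
    by_cases ht : some p.1 = t
    · have hb1 : (some p.1 == t) = true := by simp [ht]
      have hrest : ∀ x ∈ rest.map Prod.fst, x ∉ a ∧ x ∉ b ∧ x ∉ c :=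
        fun x hx => hdisj x (by simp [hx])
      simp [ht, ih a b c hndr hrest]
    · have hb1 : (some p.1 == t) = false := by simp [ht]
      by_cases h1 : p.2 ≤ -333
      · have hrest : ∀ x ∈ rest.map Prod.fst, x ∉ a ++ [p.1] ∧ x ∉ b ∧ x ∉ c := by
          intro x hx
          refine ⟨?_, (hdisj x (by simp [hx])).2.1, (hdisj x (by simp [hx])).2.2⟩
          simp only [List.mem_append, List.mem_singleton]
          rintro (h | h)
          · exact (hdisj x (by simp [hx])).1 h
          · exact hfresh (h ▸ hx)
        have hx2 : p.2 ≤ 333 := by omega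
        simp [hb1, ht, h1, hx2, pvSetAddFresh a p.1 hpa.1,
              ih (a ++ [p.1]) b c hndr hrest]
      · by_cases h2 : p.2 ≤ 333
        · have hrest : ∀ x ∈ rest.map Prod.fst, x ∉ a ∧ x ∉ b ++ [p.1] ∧ x ∉ c := by
            intro x hx
            refine ⟨(hdisj x (by simp [hx])).1, ?_, (hdisj x (by simp [hx])).2.2⟩
            simp only [List.mem_append, List.mem_singleton]
            rintro (h | h)
            · exact (hdisj x (by simp [hx])).2.1 h
            · exact hfresh (h ▸ hx)
          simp [hb1, ht, h1, h2, pvSetAddFresh b p.1 hpa.2.1,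
                ih a (b ++ [p.1]) c hndr hrest]
        · have hrest : ∀ x ∈ rest.map Prod.fst, x ∉ a ∧ x ∉ b ∧ x ∉ c ++ [p.1] := by
            intro x hx
            refine ⟨(hdisj x (by simp [hx])).1, (hdisj x (by simp [hx])).2.1, ?_⟩
            simp only [List.mem_append, List.mem_singleton]
            rintro (h | h)
            · exact (hdisj x (by simp [hx])).2.2 h
            · exact hfresh (h ▸ hx)
          simp [hb1, ht, h1, h2, pvSetAddFresh c p.1 hpa.2.2,
                ih a b (c ++ [p.1]) hndr hrest]

-- filtered key lists are still duplicate-free, so set() of them is the list itself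
lemma pvOfListFilter (q : String × Int → Bool) :
    PySem.Set.ofList ((pvSP.filter q).map Prod.fst) = (pvSP.filter q).map Prod.fst := by
  apply PySem.Set.ofList_eq_self_of_nodup
  exact pvSP_keys_nodup.sublist (List.Sublist.map Prod.fst List.filter_sublist)

-- ===== VERDICT (by name: the statement is the Claim_ definition above) =====
theorem get_anthropophily_groups_spec : Claim_equal_get_anthropophily_groups := by
  intro t _
  unfold Spec_get_anthropophily_groups
  unfold get_anthropophily_groups get_anthropophily_groups_alt
  rw [pvMapFilter (fun s v => decide (some s ≠ t) && decide (v ≤ -333)) pvSP pvLookup_mem,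
      pvMapFilter (fun s v => decide (some s ≠ t) && decide (v > -333) && decide (v ≤ 333)) pvSP pvLookup_mem,
      pvMapFilter (fun s v => decide (some s ≠ t) && decide (v > 333)) pvSP pvLookup_mem,
      pvOfListFilter, pvOfListFilter, pvOfListFilter,
      pvFoldlPartition t pvSP [] [] [] pvSP_keys_nodup (by simp)]
  simp only [List.nil_append]
  have hamb : ∀ p : String × Int,
      (decide (some p.1 ≠ t) && decide (p.2 > -333) && decide (p.2 ≤ 333))
        = (decide (some p.1 ≠ t) && !decide (p.2 ≤ -333) && decide (p.2 ≤ 333)) := by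
    intro p
    by_cases h : p.2 ≤ -333
    · have h' : ¬ p.2 > -333 := by omega
      simp [h, h']
    · have h' : p.2 > -333 := by omega
      simp [h, h']
  have hhigh : ∀ p : String × Int,
      (decide (some p.1 ≠ t) && decide (p.2 > 333))
        = (decide (some p.1 ≠ t) && !decide (p.2 ≤ 333)) := by
    intro p
    by_cases h : p.2 ≤ 333
    · have h' : ¬ p.2 > 333 := by omega
      simp [h, h']
    · have h' : p.2 > 333 := by omega
      simp [h, h']
  simp only [hamb, hhigh]
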